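-- pv_equiv track=rewrite | github.com/HodzaArmen/P1 | NacrtovanjePoti/NacrtovanjePoti.py | potrebne_vescine
-- ===== SOURCE A (Python) =====
-- def potrebne_vescine(pot, zemljevid):
--     vescine = set()
--     for i in range(len(pot) - 1):
--         trenutno_krizisce = pot[i]
--         naslednje_krizisce = pot[i + 1]
--         for x, y in zemljevid.items():
--             if (trenutno_krizisce, naslednje_krizisce) == x or (naslednje_krizisce, trenutno_krizisce) == x:
--                 vescine.update(y.split())
--     return vescine
-- ===== SOURCE B (Python) =====
-- def potrebne_vescine(pot, zemljevid):
--     # Build an index: edge (both orientations) -> all skill words of matching map entries,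
--     # then a single pass over consecutive path pairs with O(1) lookups.
--     index = {}
--     for (a, b), y in zemljevid.items():
--         w = y.split()
--         index[(a, b)] = index.get((a, b), []) + w
--         if a != b:
--             index[(b, a)] = index.get((b, a), []) + w
--     vescine = set()
--     for u, v in zip(pot, pot[1:]):
--         vescine.update(index.get((u, v), []))
--     return vescine
-- ===== Notes on version B (the rewrite author's own statement) =====
-- stated objective: faster
-- what changed: B builds a dictionary indexing each edge (both orientations) to its skill words once, then does a single pass over consecutive path pairs with O(1) lookups, instead of A's nested scan of all map entries for every path pair.
import Mathlib
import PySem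

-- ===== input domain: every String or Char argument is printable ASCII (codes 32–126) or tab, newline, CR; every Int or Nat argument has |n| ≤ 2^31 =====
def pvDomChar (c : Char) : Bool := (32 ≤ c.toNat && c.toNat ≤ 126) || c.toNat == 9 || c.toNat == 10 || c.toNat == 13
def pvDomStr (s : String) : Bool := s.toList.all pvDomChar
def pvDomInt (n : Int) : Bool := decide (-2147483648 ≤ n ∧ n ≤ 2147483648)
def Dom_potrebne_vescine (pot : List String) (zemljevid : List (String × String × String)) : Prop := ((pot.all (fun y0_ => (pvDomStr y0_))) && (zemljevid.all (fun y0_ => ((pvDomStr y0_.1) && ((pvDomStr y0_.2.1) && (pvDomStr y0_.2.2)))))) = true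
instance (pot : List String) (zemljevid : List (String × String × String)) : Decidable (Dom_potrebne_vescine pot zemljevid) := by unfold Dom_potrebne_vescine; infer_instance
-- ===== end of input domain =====

-- B replaces A's nested scan (every path pair × every map entry) by an edge-indexed
-- dictionary built once plus a single pass over consecutive path pairs (objective: faster).

-- ===== PORT A =====
def potrebne_vescine (pot : List String) (zemljevid : List (String × String × String)) : List String :=
  (PySem.List.pyRange 0 ((pot.length : Int) - 1) 1).foldl (fun vescine i =>
    let trenutno := PySem.List.pyGetD pot i ""
    let naslednje := PySem.List.pyGetD pot (i + 1) ""
    zemljevid.foldl (fun v e =>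
      if (trenutno, naslednje) = (e.1, e.2.1) ∨ (naslednje, trenutno) = (e.1, e.2.1) then
        PySem.Set.update v (PySem.Str.split₀ e.2.2)
      else v) vescine) PySem.Set.empty

-- ===== PORT B =====
-- one build step of the index: record the entry's words under both orientations of its edge
def pvStep (d : PySem.Dict (String × String) (List String)) (e : String × String × String) :
    PySem.Dict (String × String) (List String) :=
  let w := PySem.Str.split₀ e.2.2
  let d1 := d.insert (e.1, e.2.1) (d.getD (e.1, e.2.1) [] ++ w)
  if e.1 ≠ e.2.1 then
    d1.insert (e.2.1, e.1) (d1.getD (e.2.1, e.1) [] ++ w)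
  else d1

-- index: edge (both orientations) -> concatenated skill words of matching entries
def pvIndex (zemljevid : List (String × String × String)) :
    PySem.Dict (String × String) (List String) :=
  zemljevid.foldl pvStep PySem.Dict.empty

def potrebne_vescine_alt (pot : List String) (zemljevid : List (String × String × String)) : List String :=
  let idx := pvIndex zemljevid
  (pot.zip pot.tail).foldl (fun s p => PySem.Set.update s (idx.getD p [])) PySem.Set.empty

-- ===== PRECONDITION & SPEC =====
def Spec_potrebne_vescine (pot : List String) (zemljevid : List (String × String × String)) (out : List String) : Prop := out = potrebne_vescine_alt pot zemljevid
instance (pot : List String) (zemljevid : List (String × String × String)) (out : List String) : Decidable (Spec_potrebne_vescine pot zemljevid out) := by unfold Spec_potrebne_vescine; infer_instance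

-- ===== CLAIM (what is proved, stated in full; the proofs are below) =====
def Claim_equal_potrebne_vescine : Prop := ∀ (pot : List String) (zemljevid : List (String × String × String)), Dom_potrebne_vescine pot zemljevid → Spec_potrebne_vescine pot zemljevid (potrebne_vescine pot zemljevid)

-- ===== LEMMAS AND PROOFS =====

-- the words a pair (u,v) collects, in A's entry order
def pvWords (zemljevid : List (String × String × String)) (u v : String) : List String :=
  zemljevid.foldl (fun acc e =>
    if (u, v) = (e.1, e.2.1) ∨ (v, u) = (e.1, e.2.1) then acc ++ PySem.Str.split₀ e.2.2
    else acc) []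

theorem pvWords_acc (zemljevid : List (String × String × String)) (u v : String)
    (acc : List String) :
    zemljevid.foldl (fun acc e =>
      if (u, v) = (e.1, e.2.1) ∨ (v, u) = (e.1, e.2.1) then acc ++ PySem.Str.split₀ e.2.2
      else acc) acc = acc ++ pvWords zemljevid u v := by
  induction zemljevid generalizing acc with
  | nil => simp [pvWords]
  | cons e z ih =>
    simp only [pvWords, List.foldl_cons, List.nil_append]
    by_cases h : (u, v) = (e.1, e.2.1) ∨ (v, u) = (e.1, e.2.1)
    · rw [if_pos h, if_pos h, ih, ih (PySem.Str.split₀ e.2.2), List.append_assoc]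
    · rw [if_neg h, if_neg h, ih]
      rfl

theorem pvWords_cons (e : String × String × String) (z : List (String × String × String))
    (u v : String) :
    pvWords (e :: z) u v =
      (if (u, v) = (e.1, e.2.1) ∨ (v, u) = (e.1, e.2.1) then PySem.Str.split₀ e.2.2 else [])
        ++ pvWords z u v := by
  simp only [pvWords, List.foldl_cons, List.nil_append]
  split_ifs with h
  · exact pvWords_acc z u v _
  · simp

-- one build step changes the lookup at (u,v) by exactly the words A would add for that pair
theorem pvStep_getD (d : PySem.Dict (String × String) (List String))
    (e : String × String × String) (u v : String) :
    (pvStep d e).getD (u, v) [] =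
      d.getD (u, v) []
        ++ (if (u, v) = (e.1, e.2.1) ∨ (v, u) = (e.1, e.2.1) then PySem.Str.split₀ e.2.2 else []) := by
  unfold pvStep
  by_cases hab : e.1 = e.2.1
  · rw [if_neg (by simp [hab])]
    rw [PySem.Dict.getD_insert]
    by_cases hk : (u, v) = (e.1, e.2.1)
    · rw [if_pos hk, if_pos (Or.inl hk), hk]
    · have hk' : ¬ (v, u) = (e.1, e.2.1) := by
        intro h
        apply hk
        have h1 : v = e.1 := congrArg Prod.fst h
        have h2 : u = e.2.1 := congrArg Prod.snd h
        rw [h1, h2, hab]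
      rw [if_neg hk, if_neg (by tauto), List.append_nil]
  · rw [if_pos hab]
    have hne : ((e.2.1, e.1) : String × String) ≠ (e.1, e.2.1) := by
      intro h; exact hab (congrArg Prod.snd h)
    rw [PySem.Dict.getD_insert, PySem.Dict.getD_insert, PySem.Dict.getD_insert, if_neg hne]
    by_cases hk2 : (u, v) = (e.2.1, e.1)
    · have hvu : (v, u) = (e.1, e.2.1) := by
        have h1 : u = e.2.1 := congrArg Prod.fst hk2
        have h2 : v = e.1 := congrArg Prod.snd hk2
        rw [h1, h2]
      rw [if_pos hk2, if_pos (Or.inr hvu), hk2]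
    · rw [if_neg hk2]
      by_cases hk1 : (u, v) = (e.1, e.2.1)
      · rw [if_pos hk1, if_pos (Or.inl hk1), hk1]
      · have hvu : ¬ (v, u) = (e.1, e.2.1) := by
          intro h
          apply hk2
          have h1 : v = e.1 := congrArg Prod.fst h
          have h2 : u = e.2.1 := congrArg Prod.snd h
          rw [h1, h2]
        rw [if_neg hk1, if_neg (by tauto), List.append_nil]

-- the index lookup at (u,v) is exactly pvWords
theorem pvIndex_getD (zemljevid : List (String × String × String)) (u v : String) :
    (pvIndex zemljevid).getD (u, v) [] = pvWords zemljevid u v := by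
  suffices h : ∀ (d : PySem.Dict (String × String) (List String)),
      (zemljevid.foldl pvStep d).getD (u, v) [] = d.getD (u, v) [] ++ pvWords zemljevid u v by
    rw [pvIndex, h PySem.Dict.empty]
    simp [PySem.Dict.getD_empty]
  induction zemljevid with
  | nil => intro d; simp [pvWords]
  | cons e z ih =>
    intro d
    rw [List.foldl_cons, ih, pvStep_getD, pvWords_cons, List.append_assoc]

-- A's inner scan over the map is one Set.update with pvWords
theorem pvInner_eq (zemljevid : List (String × String × String)) (u v : String)
    (s : List String) :
    zemljevid.foldl (fun w e =>
      if (u, v) = (e.1, e.2.1) ∨ (v, u) = (e.1, e.2.1) then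
        PySem.Set.update w (PySem.Str.split₀ e.2.2)
      else w) s = PySem.Set.update s (pvWords zemljevid u v) := by
  induction zemljevid generalizing s with
  | nil => simp [pvWords, PySem.Set.update]
  | cons e z ih =>
    rw [List.foldl_cons, pvWords_cons]
    by_cases h : (u, v) = (e.1, e.2.1) ∨ (v, u) = (e.1, e.2.1)
    · rw [if_pos h, if_pos h, ih]
      simp [PySem.Set.update, List.foldl_append]
    · rw [if_neg h, if_neg h, ih]
      simp [PySem.Set.update]

-- index loop over range(len-1) equals the zip of consecutive pairs
theorem pvPairs_eq {σ : Type} (g : σ → String → String → σ) (pot : List String) (init : σ) :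
    (PySem.List.pyRange 0 ((pot.length : Int) - 1) 1).foldl (fun s i =>
      g s (PySem.List.pyGetD pot i "") (PySem.List.pyGetD pot (i + 1) "")) init
    = (pot.zip pot.tail).foldl (fun s p => g s p.1 p.2) init := by
  induction pot generalizing init with
  | nil => simp [PySem.List.pyRange_one_eq_nil]
  | cons x xs ih =>
    cases xs with
    | nil => simp [PySem.List.pyRange_one_eq_nil]
    | cons y ys =>
      have hlen : ((List.length (x :: y :: ys) : Int) - 1) = ((y :: ys).length : Int) := by
        simp
      have hpos : (0 : Int) < ((y :: ys).length : Int) := by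
        have : 0 < (y :: ys).length := by simp
        exact_mod_cast this
      rw [hlen, PySem.List.pyRange_one_cons hpos]
      simp only [List.foldl_cons]
      have h0 : PySem.List.pyGetD (x :: y :: ys) 0 "" = x := PySem.List.pyGetD_zero_cons _ _ _
      have h1 : PySem.List.pyGetD (x :: y :: ys) (0 + 1) "" = y := by
        rw [show ((0 : Int) + 1) = ((1 : Nat) : Int) by norm_num, PySem.List.pyGetD_natCast]
        rfl
      rw [h0, h1, show ((0 : Int) + 1) = (1 : Int) by norm_num]
      have hmap : PySem.List.pyRange 1 (((y :: ys).length : Int)) 1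
          = (PySem.List.pyRange 0 (((y :: ys).length : Int) - 1) 1).map (· + 1) := by
        rw [PySem.List.pyRange_one, PySem.List.pyRange_one, List.map_map]
        rw [show (((y :: ys).length : Int) - 1 - 0) = (((y :: ys).length : Int) - 1) by ring]
        apply List.map_congr_left
        intro a _
        simp [Function.comp]
        ring
      rw [hmap, List.foldl_map]
      rw [PySem.List.foldl_congr_mem _ _ (fun s i =>
        g s (PySem.List.pyGetD (y :: ys) i "") (PySem.List.pyGetD (y :: ys) (i + 1) "")) _ ?_]
      · rw [ih]
        rfl
      · intro acc i hi
        have hi' : 0 ≤ i := (PySem.List.mem_pyRange_one.mp hi).1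
        obtain ⟨n, hn⟩ := Int.eq_ofNat_of_zero_le hi'
        subst hn
        have e1 : ((n : Int) + 1) = ((n + 1 : Nat) : Int) := by push_cast; ring
        have e3 : (((n + 1 : Nat) : Int) + 1) = ((n + 2 : Nat) : Int) := by push_cast; ring
        simp only [e1, e3, PySem.List.pyGetD_natCast]
        rfl

-- ===== VERDICT (by name: the statement is the Claim_ definition above) =====
theorem potrebne_vescine_spec : Claim_equal_potrebne_vescine := by
  intro pot zemljevid _
  show potrebne_vescine pot zemljevid = potrebne_vescine_alt pot zemljevid
  unfold potrebne_vescine potrebne_vescine_alt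
  rw [pvPairs_eq (fun s u v =>
    zemljevid.foldl (fun w e =>
      if (u, v) = (e.1, e.2.1) ∨ (v, u) = (e.1, e.2.1) then
        PySem.Set.update w (PySem.Str.split₀ e.2.2)
      else w) s)]
  apply PySem.List.foldl_congr_mem
  intro s p _
  rw [pvInner_eq, pvIndex_getD]
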